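-- pv_equiv track=rewrite | github.com/Omm045/advanced-password-generator | security_utils.py | _check_sequences
-- ===== SOURCE A (Python) =====
-- from typing import Dict, List, Any
--
-- def _check_sequences(password: str) -> List[str]:
--     """Check for character sequences"""
--     sequences_found = []
--
--     if len(password) < 3:
--         return sequences_found
--
--     # Check for ascending sequences
--     for i in range(len(password) - 2):
--         if (ord(password[i]) + 1 == ord(password[i + 1]) and
--             ord(password[i + 1]) + 1 == ord(password[i + 2])):
--             sequences_found.append(f"Ascending sequence: {password[i:i+3]}")
--
--     # Check for descending sequences
--     for i in range(len(password) - 2):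
--         if (ord(password[i]) - 1 == ord(password[i + 1]) and
--             ord(password[i + 1]) - 1 == ord(password[i + 2])):
--             sequences_found.append(f"Descending sequence: {password[i:i+3]}")
--
--     return sequences_found
-- ===== SOURCE B (Python) =====
-- def _check_sequences(password: str):
--     """Check for character sequences via run-length encoding of consecutive
--     char deltas: each maximal run of r equal deltas +1 (or -1) yields r-1
--     ascending (descending) triples, emitted in one jump per run."""
--     deltas = [ord(b) - ord(a) for a, b in zip(password, password[1:])]
--     asc, desc = [], []
--     j = 0
--     while j < len(deltas):
--         d = deltas[j]
--         run = 1
--         while j + run < len(deltas) and deltas[j + run] == d: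
--             run += 1
--         if d == 1:
--             asc += [f"Ascending sequence: {password[s:s+3]}" for s in range(j, j + run - 1)]
--         elif d == -1:
--             desc += [f"Descending sequence: {password[s:s+3]}" for s in range(j, j + run - 1)]
--         j += run
--     return asc + desc
-- ===== Notes on version B (the rewrite author's own statement) =====
-- stated objective: alternative
-- what changed: Replaces A's two per-window full scans by run-length encoding of the consecutive-character deltas: one while loop jumps run by run, and each maximal run of r equal deltas +1 (resp. -1) emits its r-1 ascending (resp. descending) triples in a block; result is asc + desc.
import Mathlib
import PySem

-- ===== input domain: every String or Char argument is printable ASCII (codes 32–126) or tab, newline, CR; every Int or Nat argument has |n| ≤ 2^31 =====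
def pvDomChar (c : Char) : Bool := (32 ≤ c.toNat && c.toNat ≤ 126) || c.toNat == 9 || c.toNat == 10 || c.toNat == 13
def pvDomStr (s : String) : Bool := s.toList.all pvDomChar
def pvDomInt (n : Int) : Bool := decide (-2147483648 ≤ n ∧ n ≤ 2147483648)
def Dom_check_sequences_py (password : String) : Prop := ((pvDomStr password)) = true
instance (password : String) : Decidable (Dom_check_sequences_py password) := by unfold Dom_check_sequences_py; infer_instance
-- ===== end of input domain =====

-- B replaces A's two per-window scans by run-length encoding of the consecutive-character
-- deltas: one while loop jumps run by run, and each maximal run of r equal deltas +1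
-- (resp. -1) emits its r-1 ascending (resp. descending) triples; result is asc + desc.

-- ===== PORT A =====
-- password[i:i+3] with 0 ≤ i: exact as (take 3 (drop i)) of the char list
def pvWin (cs : List Char) (i : Nat) : String := String.ofList ((cs.drop i).take 3)
-- ord(password[i]) for an in-range index: exact via getD (all uses are guarded in range)
def pvOrd (cs : List Char) (i : Nat) : Nat := (cs.getD i ' ').toNat

def check_sequences_py (password : String) : List String :=
  let cs := password.toList
  if cs.length < 3 then []
  else
    -- first loop: ascending sequences
    let found :=
      (List.range (cs.length - 2)).foldl (fun acc i =>
        if pvOrd cs i + 1 = pvOrd cs (i+1) ∧ pvOrd cs (i+1) + 1 = pvOrd cs (i+2) then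
          acc ++ ["Ascending sequence: " ++ pvWin cs i]
        else acc) []
    -- second loop: descending sequences
    (List.range (cs.length - 2)).foldl (fun acc i =>
      if pvOrd cs i = pvOrd cs (i+1) + 1 ∧ pvOrd cs (i+1) = pvOrd cs (i+2) + 1 then
        acc ++ ["Descending sequence: " ++ pvWin cs i]
      else acc) found

-- ===== PORT B =====
-- deltas = [ord(b) - ord(a) for a, b in zip(password, password[1:])]
def pvDeltas (cs : List Char) : List Int :=
  (List.zip cs (cs.drop 1)).map (fun p => (p.2.toNat : Int) - (p.1.toNat : Int))

-- inner while loop: extend the current run while the next delta equals d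
def pvRunLen (ds : List Int) (d : Int) (j run : Nat) : Nat :=
  if h : j + run < ds.length ∧ ds.getD (j + run) 0 = d then
    pvRunLen ds d j (run + 1)
  else run
termination_by ds.length - (j + run)
decreasing_by omega

-- needed for the outer loop's termination
theorem pvRunLen_ge (ds : List Int) (d : Int) (j run : Nat) : run ≤ pvRunLen ds d j run := by
  fun_induction pvRunLen <;> omega

-- outer while loop over runs, with the two accumulators
def pvRunLoop (cs : List Char) (ds : List Int) (j : Nat) (asc desc : List String) :
    List String × List String :=
  if _h : j < ds.length then
    let d := ds.getD j 0
    let run := pvRunLen ds d j 1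
    let p : List String × List String :=
      if d = 1 then
        (asc ++ (List.range' j (run - 1)).map (fun s => "Ascending sequence: " ++ pvWin cs s), desc)
      else if d = -1 then
        (asc, desc ++ (List.range' j (run - 1)).map (fun s => "Descending sequence: " ++ pvWin cs s))
      else (asc, desc)
    pvRunLoop cs ds (j + run) p.1 p.2
  else (asc, desc)
termination_by ds.length - j
decreasing_by have := pvRunLen_ge ds (ds.getD j 0) j 1; omega

def check_sequences_py_alt (password : String) : List String :=
  let cs := password.toList
  let p := pvRunLoop cs (pvDeltas cs) 0 [] []
  p.1 ++ p.2

-- ===== PRECONDITION & SPEC =====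
def Spec_check_sequences_py (password : String) (out : List String) : Prop := out = check_sequences_py_alt password
instance (password : String) (out : List String) : Decidable (Spec_check_sequences_py password out) := by unfold Spec_check_sequences_py; infer_instance

-- ===== CLAIM (what is proved, stated in full; the proofs are below) =====
def Claim_equal_check_sequences_py : Prop := ∀ (password : String), Dom_check_sequences_py password → Spec_check_sequences_py password (check_sequences_py password)

-- ===== LEMMAS AND PROOFS =====

-- the windows from j on whose two deltas both equal v, formatted
def pvWins (cs : List Char) (ds : List Int) (v : Int) (pre : String) (j len : Nat) : List String :=
  ((List.range' j len).filter (fun t => decide (ds.getD t 0 = v ∧ ds.getD (t+1) 0 = v))).map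
    (fun i => pre ++ pvWin cs i)

theorem pvRunLen_le (ds : List Int) (d : Int) (j run : Nat) (h : j + run ≤ ds.length) :
    j + pvRunLen ds d j run ≤ ds.length := by
  fun_induction pvRunLen with
  | case1 r hg ih => exact ih (by omega)
  | case2 r hg => exact h

theorem pvRunLen_mem (ds : List Int) (d : Int) (j run : Nat) :
    ∀ t, run ≤ t → t < pvRunLen ds d j run → ds.getD (j + t) 0 = d := by
  fun_induction pvRunLen with
  | case1 r hg ih =>
    intro t h1 h2
    by_cases ht : t = r
    · subst ht; exact hg.2
    · exact ih t (by omega) h2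
  | case2 r hg => intro t h1 h2; exact absurd h2 (by omega)

theorem pvRunLen_end (ds : List Int) (d : Int) (j run : Nat) :
    j + pvRunLen ds d j run < ds.length → ds.getD (j + pvRunLen ds d j run) 0 ≠ d := by
  fun_induction pvRunLen with
  | case1 r hg ih => exact ih
  | case2 r hg =>
    intro h hc
    exact hg ⟨by omega, hc⟩

-- splitting the windows-from-j list at the end of the maximal run [j, j+run)
theorem pvWins_split (cs : List Char) (ds : List Int) (v : Int) (pre : String)
    (j run : Nat) (d : Int) (hj : j < ds.length) (hrun : 1 ≤ run)
    (hle : j + run ≤ ds.length)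
    (hall : ∀ t, j ≤ t → t < j + run → ds.getD t 0 = d)
    (hend : j + run < ds.length → ds.getD (j + run) 0 ≠ d) :
    pvWins cs ds v pre j (ds.length - 1 - j) =
      (if d = v then (List.range' j (run - 1)).map (fun s => pre ++ pvWin cs s) else [])
        ++ pvWins cs ds v pre (j + run) (ds.length - 1 - (j + run)) := by
  by_cases hw : j < ds.length - 1
  · have hsplit : List.range' j (ds.length - 1 - j)
        = List.range' j (run - 1) ++ List.range' (j + (run - 1)) (ds.length - 1 - j - (run - 1)) := by
      have hap := @List.range'_append j (run - 1) (ds.length - 1 - j - (run - 1)) 1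
      simp only [one_mul] at hap
      rw [show (run - 1) + (ds.length - 1 - j - (run - 1)) = ds.length - 1 - j from by omega] at hap
      exact hap.symm
    unfold pvWins
    rw [hsplit, List.filter_append, List.map_append]
    congr 1
    · have hcong : ∀ t ∈ List.range' j (run - 1),
          (decide (ds.getD t 0 = v ∧ ds.getD (t+1) 0 = v)) = decide (d = v) := by
        intro t ht
        rw [List.mem_range'_1] at ht
        rw [hall t (by omega) (by omega), hall (t + 1) (by omega) (by omega)]
        simp
      rw [List.filter_congr hcong]
      by_cases hdv : d = v
      · simp [hdv]
      · simp [hdv]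
    · by_cases hjr : j + run < ds.length
      · have hc2 : ds.length - 1 - j - (run - 1) = (ds.length - 1 - (j + run)) + 1 := by omega
        rw [hc2, List.range'_succ, List.filter_cons]
        have hd1 : ds.getD (j + (run - 1)) 0 = d := hall _ (by omega) (by omega)
        have he1 : j + (run - 1) + 1 = j + run := by omega
        have hcond : (decide (ds.getD (j + (run-1)) 0 = v ∧ ds.getD (j + (run-1) + 1) 0 = v)) = false := by
          rw [hd1, he1]
          simp only [decide_eq_false_iff_not]
          rintro ⟨h1, h2⟩
          exact (hend hjr) (h1 ▸ h2)
        rw [hcond, he1]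
        simp
      · have h0 : ds.length - 1 - j - (run - 1) = 0 := by omega
        have h0' : ds.length - 1 - (j + run) = 0 := by omega
        rw [h0, h0']
        simp
  · have h0 : ds.length - 1 - j = 0 := by omega
    have h0' : ds.length - 1 - (j + run) = 0 := by omega
    have hrun1 : run = 1 := by omega
    rw [h0, h0', hrun1]
    simp [pvWins, ite_self]

-- the run loop computes exactly the window lists, appended to its accumulators
theorem pvRunLoop_spec (cs : List Char) (ds : List Int) (j : Nat) (asc desc : List String) :
    pvRunLoop cs ds j asc desc =
      (asc ++ pvWins cs ds 1 "Ascending sequence: " j (ds.length - 1 - j),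
       desc ++ pvWins cs ds (-1) "Descending sequence: " j (ds.length - 1 - j)) := by
  fun_induction pvRunLoop with
  | case1 j asc desc hj d run p ih =>
    have hrun : 1 ≤ run := pvRunLen_ge ds d j 1
    have hle : j + run ≤ ds.length := pvRunLen_le ds d j 1 (by omega)
    have hall : ∀ t, j ≤ t → t < j + run → ds.getD t 0 = d := by
      intro t h1 h2
      by_cases ht : t = j
      · subst ht; rfl
      · have := pvRunLen_mem ds d j 1 (t - j) (by omega) (by omega)
        rwa [Nat.add_sub_cancel' h1] at this
    have hend : j + run < ds.length → ds.getD (j + run) 0 ≠ d := fun h =>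
      pvRunLen_end ds d j 1 h
    rw [ih,
        pvWins_split cs ds 1 "Ascending sequence: " j run d hj hrun hle hall hend,
        pvWins_split cs ds (-1) "Descending sequence: " j run d hj hrun hle hall hend]
    simp only [p]
    by_cases hd1 : d = 1
    · simp [hd1]
    · by_cases hd2 : d = -1
      · simp [hd2]
      · simp [hd1, hd2]
  | case2 j asc desc hj =>
    have h0 : ds.length - 1 - j = 0 := by omega
    rw [h0]
    simp [pvWins]

theorem pvDeltas_length (cs : List Char) : (pvDeltas cs).length = cs.length - 1 := by
  simp [pvDeltas]

theorem pvDeltas_getD (cs : List Char) (t : Nat) (h : t < cs.length - 1) :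
    (pvDeltas cs).getD t 0 = (pvOrd cs (t+1) : Int) - (pvOrd cs t : Int) := by
  have hlen : t < (pvDeltas cs).length := by rw [pvDeltas_length]; omega
  rw [List.getD_eq_getElem _ _ hlen]
  unfold pvDeltas pvOrd
  simp only [List.getElem_map, List.getElem_zip, List.getElem_drop]
  rw [List.getD_eq_getElem _ _ (by omega : t + 1 < cs.length),
      List.getD_eq_getElem _ _ (by omega : t < cs.length)]
  have e : 1 + t = t + 1 := Nat.add_comm 1 t
  simp only [e]

-- ===== VERDICT (by name: the statement is the Claim_ definition above) =====
theorem check_sequences_py_spec : Claim_equal_check_sequences_py := by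
  intro password _
  unfold Spec_check_sequences_py
  simp only [check_sequences_py, check_sequences_py_alt]
  rw [pvRunLoop_spec]
  set cs := password.toList with hcs
  by_cases h3 : cs.length < 3
  · have h0 : (pvDeltas cs).length - 1 - 0 = 0 := by rw [pvDeltas_length]; omega
    rw [if_pos h3, h0]
    simp [pvWins]
  · rw [if_neg h3,
        PySem.List.foldl_append_ite
          (fun i => pvOrd cs i + 1 = pvOrd cs (i+1) ∧ pvOrd cs (i+1) + 1 = pvOrd cs (i+2))
          (fun i => "Ascending sequence: " ++ pvWin cs i),
        PySem.List.foldl_append_ite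
          (fun i => pvOrd cs i = pvOrd cs (i+1) + 1 ∧ pvOrd cs (i+1) = pvOrd cs (i+2) + 1)
          (fun i => "Descending sequence: " ++ pvWin cs i)]
    have hrange : List.range' 0 ((pvDeltas cs).length - 1 - 0) = List.range (cs.length - 2) := by
      rw [pvDeltas_length, List.range_eq_range']
      congr 1
    have hasc : pvWins cs (pvDeltas cs) 1 "Ascending sequence: " 0 ((pvDeltas cs).length - 1 - 0)
        = ((List.range (cs.length - 2)).filter
            (fun i => decide (pvOrd cs i + 1 = pvOrd cs (i+1) ∧ pvOrd cs (i+1) + 1 = pvOrd cs (i+2)))).map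
            (fun i => "Ascending sequence: " ++ pvWin cs i) := by
      unfold pvWins
      rw [hrange]
      congr 1
      apply List.filter_congr
      intro t ht
      rw [List.mem_range] at ht
      rw [pvDeltas_getD cs t (by omega), pvDeltas_getD cs (t+1) (by omega)]
      have e2 : t + 1 + 1 = t + 2 := rfl
      simp only [e2]
      apply decide_eq_decide.mpr
      constructor <;> intro hh <;> omega
    have hdesc : pvWins cs (pvDeltas cs) (-1) "Descending sequence: " 0 ((pvDeltas cs).length - 1 - 0)
        = ((List.range (cs.length - 2)).filter
            (fun i => decide (pvOrd cs i = pvOrd cs (i+1) + 1 ∧ pvOrd cs (i+1) = pvOrd cs (i+2) + 1))).map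
            (fun i => "Descending sequence: " ++ pvWin cs i) := by
      unfold pvWins
      rw [hrange]
      congr 1
      apply List.filter_congr
      intro t ht
      rw [List.mem_range] at ht
      rw [pvDeltas_getD cs t (by omega), pvDeltas_getD cs (t+1) (by omega)]
      have e2 : t + 1 + 1 = t + 2 := rfl
      simp only [e2]
      apply decide_eq_decide.mpr
      constructor <;> intro hh <;> omega
    rw [hasc, hdesc]
    simp
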